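-- pv_equiv track=rewrite | github.com/hariharanragothaman/AlgoDSBits | Array/cirrus2.py | solution
-- ===== SOURCE A (Python) =====
-- def solution(S):
--     # write your code in Python 3.6
--     if not S:
--         return ""
--
--     output = []
--     S = [c for c in S]
--     i = 0
--     while i <= len(S) - 1:
--         if i == len(S) -1:
--             output.append(S[i])
--             break
--         elif S[i] == 'A' and S[i + 1] != 'B' or (S[i] == 'C' and S[i + 1] != 'D'):
--             output.append(S[i])
--             i += 1
--         elif S[i] == 'A' and S[i + 1] == 'B' or (S[i] == 'C' and S[i + 1] == 'D'):
--             i += 2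
--         elif S[i] == 'B' and S[i + 1] == 'A' or (S[i] == 'D' and S[i + 1] == 'C'):
--             i += 2
--         else:
--             output.append(S[i])
--             i += 1
--
--     output = ''.join(c for c in output)
--
--     if output == 'AB' or output == 'BA' or output == 'CD' or output == 'DC':
--         return ''
--     else:
--         return output
-- ===== SOURCE B (Python) =====
-- def solution(S):
--     # Staged substring-search removal: repeatedly find the leftmost occurrence
--     # of any of the four pair patterns with str.find, emit the prefix before it,
--     # and continue after the pair (non-cascading, leftmost, non-overlapping).
--     parts = []
--     s = S
--     while True:
--         best = -1
--         for p in ("AB", "BA", "CD", "DC"):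
--             i = s.find(p)
--             if i != -1 and (best == -1 or i < best):
--                 best = i
--         if best == -1:
--             parts.append(s)
--             break
--         parts.append(s[:best])
--         s = s[best + 2:]
--     res = ''.join(parts)
--     return '' if res in ('AB', 'BA', 'CD', 'DC') else res
-- ===== Notes on version B (the rewrite author's own statement) =====
-- stated objective: faster
-- what changed: Replaced A's character-by-character index-jumping scan by staged substring search: repeatedly locate the leftmost occurrence of any of the four pair patterns with str.find, emit the prefix before it and resume after the pair; no per-character state machine remains.
import Mathlib
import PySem

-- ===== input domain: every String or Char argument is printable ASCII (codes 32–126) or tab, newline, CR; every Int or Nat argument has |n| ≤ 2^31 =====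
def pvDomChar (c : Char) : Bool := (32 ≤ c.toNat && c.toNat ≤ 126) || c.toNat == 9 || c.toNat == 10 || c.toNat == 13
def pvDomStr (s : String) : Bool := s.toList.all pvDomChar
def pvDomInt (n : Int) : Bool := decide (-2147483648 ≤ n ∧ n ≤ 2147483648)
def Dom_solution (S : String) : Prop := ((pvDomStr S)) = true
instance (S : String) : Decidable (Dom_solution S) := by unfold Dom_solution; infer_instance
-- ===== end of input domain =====

-- B replaces A's per-character index-jumping scan by staged substring search
-- (repeatedly find the leftmost of the four pair patterns and cut it out): alternative algorithm.

-- ===== PORT A =====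
-- A's while loop; every index accessed is in range, so pyGetD's default is never used
def solutionLoop (s : List Char) : Nat → Int → List Char → List Char
  | 0, _, output => output   -- fuel guard only; never reached from solution's call
  | fuel + 1, i, output =>
    if i ≤ (s.length : Int) - 1 then
      if i = (s.length : Int) - 1 then
        output ++ [PySem.List.pyGetD s i 'A']
      else if (PySem.List.pyGetD s i 'A' == 'A' && PySem.List.pyGetD s (i+1) 'A' != 'B')
           || (PySem.List.pyGetD s i 'A' == 'C' && PySem.List.pyGetD s (i+1) 'A' != 'D') then
        solutionLoop s fuel (i + 1) (output ++ [PySem.List.pyGetD s i 'A'])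
      else if (PySem.List.pyGetD s i 'A' == 'A' && PySem.List.pyGetD s (i+1) 'A' == 'B')
           || (PySem.List.pyGetD s i 'A' == 'C' && PySem.List.pyGetD s (i+1) 'A' == 'D') then
        solutionLoop s fuel (i + 2) output
      else if (PySem.List.pyGetD s i 'A' == 'B' && PySem.List.pyGetD s (i+1) 'A' == 'A')
           || (PySem.List.pyGetD s i 'A' == 'D' && PySem.List.pyGetD s (i+1) 'A' == 'C') then
        solutionLoop s fuel (i + 2) output
      else
        solutionLoop s fuel (i + 1) (output ++ [PySem.List.pyGetD s i 'A'])
    else output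

def solution (S : String) : String :=
  if S = "" then ""
  else
    let output := solutionLoop S.toList (S.toList.length + 1) 0 []
    let out := String.ofList output
    if out = "AB" ∨ out = "BA" ∨ out = "CD" ∨ out = "DC" then "" else out

-- ===== PORT B =====
-- the four two-character patterns Source B searches for, in Source B's order
def pvPats : List (List Char) := [['A', 'B'], ['B', 'A'], ['C', 'D'], ['D', 'C']]

-- Source B's inner for-loop body: keep i when found and smaller than the best so far
def bestStep (s : List Char) (best : Int) (p : List Char) : Int :=
  let i := PySem.Chars.find s p
  if i ≠ -1 ∧ (best = -1 ∨ i < best) then i else best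

-- Source B's inner for-loop: minimum of the found indices, -1 if none found
def bestFind (s : List Char) : Int := pvPats.foldl (bestStep s) (-1)

-- Source B's outer while loop (s and parts as char lists; ''.join at the end)
def solutionAltLoop : Nat → List Char → List Char → List Char
  | 0, s, parts => parts ++ s   -- fuel guard only; never reached from solution_alt's call
  | fuel + 1, s, parts =>
    let best := bestFind s
    if best = -1 then parts ++ s
    else solutionAltLoop fuel (s.drop (best.toNat + 2)) (parts ++ s.take best.toNat)

def solution_alt (S : String) : String :=
  let res := String.ofList (solutionAltLoop S.toList.length S.toList [])
  if res = "AB" ∨ res = "BA" ∨ res = "CD" ∨ res = "DC" then "" else res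

-- ===== PRECONDITION & SPEC =====
def Spec_solution (S : String) (out : String) : Prop := out = solution_alt S
instance (S : String) (out : String) : Decidable (Spec_solution S out) := by unfold Spec_solution; infer_instance

-- ===== CLAIM (what is proved, stated in full; the proofs are below) =====
def Claim_equal_solution : Prop := ∀ (S : String), Dom_solution S → Spec_solution S (solution S)

-- ===== LEMMAS AND PROOFS =====

-- is (a, b) one of the four removable pairs (proof-only reference predicate)
def solutionPair (p c : Char) : Bool :=
  (p == 'A' && c == 'B') || (p == 'B' && c == 'A') || (p == 'C' && c == 'D') || (p == 'D' && c == 'C')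

-- reference single-pass pair removal (proof-only)
def pairRem : List Char → List Char
  | [] => []
  | [c] => [c]
  | a :: b :: t => if solutionPair a b then pairRem t else a :: pairRem (b :: t)

lemma pairRem_two (a b : Char) (t : List Char) :
    pairRem (a :: b :: t) = if solutionPair a b then pairRem t else a :: pairRem (b :: t) := by
  simp [pairRem]

-- A's elif chain collapses to a single pair test
lemma branch_eq {α : Type} (a b : Char) (app skip : α) :
    (if (a == 'A' && b != 'B') || (a == 'C' && b != 'D') then app
     else if (a == 'A' && b == 'B') || (a == 'C' && b == 'D') then skip
     else if (a == 'B' && b == 'A') || (a == 'D' && b == 'C') then skip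
     else app) = if solutionPair a b then skip else app := by
  by_cases hA : a = 'A' <;> by_cases hB : a = 'B' <;> by_cases hC : a = 'C' <;> by_cases hD : a = 'D' <;>
    simp_all [solutionPair]

lemma loop_eq_pairRem (fuel : Nat) (s : List Char) (i : Nat) (output : List Char)
    (hf : s.length - i < fuel) :
    solutionLoop s fuel (i : Int) output = output ++ pairRem (s.drop i) := by
  induction fuel generalizing i output with
  | zero => omega
  | succ fuel ih =>
    cases hd : s.drop i with
    | nil =>
      have hge : s.length ≤ i := by
        have h := congrArg List.length hd; simp at h; omega
      simp only [solutionLoop]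
      rw [if_neg (by omega)]
      simp [pairRem]
    | cons a t =>
      have hlen : t.length + 1 = s.length - i := by
        have h := congrArg List.length hd; simp at h; omega
      have hlt : i < s.length := by omega
      have hsa : s[i]? = some a := by
        have h0 : (s.drop i)[0]? = some a := by simp [hd]
        simpa using h0
      have hA : PySem.List.pyGetD s (i : Int) 'A' = a := by
        simp [PySem.List.pyGetD_natCast, List.getD, hsa]
      cases ht : t with
      | nil =>
        have hlast : (i : Int) = (s.length : Int) - 1 := by
          subst ht; simp at hlen; omega
        simp only [solutionLoop]
        rw [if_pos (by omega), if_pos hlast, hA]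
        simp [pairRem]
      | cons b t2 =>
        have hsb : s[i+1]? = some b := by
          have h1 : (s.drop i)[1]? = some b := by simp [hd, ht]
          simpa [List.getElem?_drop] using h1
        have hB : PySem.List.pyGetD s ((i : Int) + 1) 'A' = b := by
          have hc : ((i : Int) + 1) = ((i + 1 : Nat) : Int) := by push_cast; ring
          rw [hc, PySem.List.pyGetD_natCast]
          simp [List.getD, hsb]
        have hd1 : s.drop (i + 1) = b :: t2 := by
          have h := congrArg (List.drop 1) hd
          simpa [List.drop_drop, ht, Nat.add_comm] using h
        have hd2 : s.drop (i + 2) = t2 := by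
          have h := congrArg (List.drop 1) hd1
          simpa [List.drop_drop, show 1 + (i + 1) = i + 2 by omega] using h
        have ih1 : solutionLoop s fuel ((i : Int) + 1) (output ++ [a]) = (output ++ [a]) ++ pairRem (b :: t2) := by
          have h := ih (i + 1) (output ++ [a]) (by omega)
          rw [hd1] at h; exact_mod_cast h
        have ih2 : solutionLoop s fuel ((i : Int) + 2) output = output ++ pairRem t2 := by
          have h := ih (i + 2) output (by omega)
          rw [hd2] at h; exact_mod_cast h
        have hmid : (i : Int) ≠ (s.length : Int) - 1 := by
          subst ht; simp at hlen; omega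
        simp only [solutionLoop]
        rw [if_pos (by omega), if_neg hmid, hA, hB,
          branch_eq a b (solutionLoop s fuel ((i : Int) + 1) (output ++ [a])) (solutionLoop s fuel ((i : Int) + 2) output),
          pairRem_two]
        split
        · exact ih2
        · rw [ih1]; simp

-- a removable pair starts at position j
def pairAt (s : List Char) (j : Nat) : Prop :=
  ∃ a b t, s.drop j = a :: b :: t ∧ solutionPair a b = true

lemma matchAt_iff (s : List Char) (j : Nat) :
    (∃ p ∈ pvPats, p <+: s.drop j) ↔ pairAt s j := by
  constructor
  · rintro ⟨p, hp, t, ht⟩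
    simp only [pvPats, List.mem_cons, List.not_mem_nil, or_false] at hp
    rcases hp with rfl | rfl | rfl | rfl <;>
      exact ⟨_, _, t, ht.symm, by decide⟩
  · rintro ⟨a, b, t, ht, hpair⟩
    have hmem : [a, b] ∈ pvPats := by
      simp only [solutionPair, Bool.or_eq_true, Bool.and_eq_true, beq_iff_eq] at hpair
      simp only [pvPats, List.mem_cons, List.not_mem_nil, or_false, List.cons.injEq, and_true]
      tauto
    exact ⟨[a, b], hmem, t, by simp [ht]⟩

lemma find_neg_no_prefix (s p : List Char) (h : PySem.Chars.find s p = -1) :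
    ∀ j, ¬ p <+: s.drop j := by
  intro j hp
  have hinf : ¬ p <:+: s := (PySem.Chars.find_eq_neg_one_iff s p).mp h
  exact hinf ((PySem.Chars.isIn_iff_infix p s).mp
    ((PySem.Chars.exists_prefix_drop_iff_isIn p s).mp ⟨j, hp⟩))

lemma pairRem_of_no_pair (s : List Char) (h : ∀ j, ¬ pairAt s j) : pairRem s = s := by
  match s with
  | [] => rfl
  | [c] => rfl
  | a :: b :: t =>
    have h0 : ¬ solutionPair a b = true := by
      intro hpair
      exact h 0 ⟨a, b, t, rfl, hpair⟩
    rw [pairRem_two, if_neg h0]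
    have := pairRem_of_no_pair (b :: t) (fun j hj => by
      obtain ⟨x, y, u, hu, hxy⟩ := hj
      exact h (j + 1) ⟨x, y, u, by simpa using hu, hxy⟩)
    rw [this]

lemma pairRem_split (i : Nat) (s : List Char) (hi : pairAt s i)
    (hmin : ∀ j < i, ¬ pairAt s j) :
    pairRem s = s.take i ++ pairRem (s.drop (i + 2)) := by
  induction i generalizing s with
  | zero =>
    obtain ⟨a, b, t, ht, hpair⟩ := hi
    simp only [List.drop_zero] at ht
    subst ht
    rw [pairRem_two, if_pos hpair]
    simp
  | succ i ih =>
    obtain ⟨a, b, t, ht, hpair⟩ := hi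
    match s with
    | [] => simp at ht
    | c :: s' =>
      have hi' : pairAt s' i := ⟨a, b, t, by simpa using ht, hpair⟩
      have hne : s' ≠ [] := by
        intro h0
        obtain ⟨x, y, u, hu, _⟩ := hi'
        simp [h0] at hu
      obtain ⟨d, s'', rfl⟩ := List.exists_cons_of_ne_nil hne
      have h0 : ¬ solutionPair c d = true := by
        intro hpair0
        exact hmin 0 (by omega) ⟨c, d, s'', rfl, hpair0⟩
      rw [pairRem_two, if_neg h0]
      rw [ih (d :: s'') hi' (fun j hj hpj => by
        obtain ⟨x, y, u, hu, hxy⟩ := hpj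
        exact hmin (j + 1) (by omega) ⟨x, y, u, by simpa using hu, hxy⟩)]
      simp

-- facts about bestFind (proof-only)
lemma bestStep_choice (s : List Char) (b : Int) (q : List Char) :
    bestStep s b q = PySem.Chars.find s q ∨ bestStep s b q = b := by
  by_cases hc : PySem.Chars.find s q ≠ -1 ∧ (b = -1 ∨ PySem.Chars.find s q < b)
  · exact Or.inl (if_pos hc)
  · exact Or.inr (if_neg hc)

lemma foldl_bestStep_choice (s : List Char) (ps : List (List Char)) (b : Int) :
    ps.foldl (bestStep s) b = b ∨ ∃ p ∈ ps, ps.foldl (bestStep s) b = PySem.Chars.find s p := by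
  induction ps generalizing b with
  | nil => exact Or.inl rfl
  | cons q qs ih =>
    rw [List.foldl_cons]
    rcases ih (bestStep s b q) with h | ⟨p, hp, h⟩
    · rw [h]
      rcases bestStep_choice s b q with h2 | h2
      · exact Or.inr ⟨q, List.mem_cons_self, h2⟩
      · exact Or.inl h2
    · exact Or.inr ⟨p, List.mem_cons_of_mem q hp, h⟩

lemma pvPats_len (p : List Char) (hp : p ∈ pvPats) : p.length = 2 := by
  simp only [pvPats, List.mem_cons, List.not_mem_nil, or_false] at hp
  rcases hp with rfl | rfl | rfl | rfl <;> rfl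

lemma bestFind_pos_lt (s : List Char) (h : bestFind s ≠ -1) :
    (bestFind s).toNat + 2 ≤ s.length := by
  rcases foldl_bestStep_choice s pvPats (-1) with h0 | ⟨p, hp, hfind⟩
  · exact absurd h0 h
  · have hfind' : bestFind s = PySem.Chars.find s p := hfind
    have hge := PySem.Chars.neg_one_le_find s p
    have hpos : 0 ≤ PySem.Chars.find s p := by
      rw [hfind'] at h; omega
    obtain ⟨t, ht⟩ := (PySem.Chars.find_spec hpos).1
    have hlen := congrArg List.length ht
    rw [List.length_append, List.length_drop, pvPats_len p hp] at hlen
    rw [hfind']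
    omega

-- full characterisation of bestFind (used only by the proofs below)
lemma foldl_bestStep_inv (s : List Char) (ps : List (List Char)) (b : Int) (hb : -1 ≤ b) :
    -1 ≤ ps.foldl (bestStep s) b ∧
    (ps.foldl (bestStep s) b = -1 → (b = -1 ∧ ∀ p ∈ ps, PySem.Chars.find s p = -1)) ∧
    (b ≠ -1 → ps.foldl (bestStep s) b ≤ b) ∧
    (∀ p ∈ ps, PySem.Chars.find s p = -1 ∨ ps.foldl (bestStep s) b ≤ PySem.Chars.find s p) := by
  induction ps generalizing b with
  | nil =>
    exact ⟨hb, fun h => ⟨h, by simp⟩, fun _ => le_refl b, by simp⟩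
  | cons q qs ih =>
    rw [List.foldl_cons]
    have hq := PySem.Chars.neg_one_le_find s q
    by_cases hc : PySem.Chars.find s q ≠ -1 ∧ (b = -1 ∨ PySem.Chars.find s q < b)
    · have hstep : bestStep s b q = PySem.Chars.find s q := by
        unfold bestStep; rw [if_pos hc]
      rw [hstep]
      obtain ⟨h1, h2, h3, h4⟩ := ih (PySem.Chars.find s q) hq
      refine ⟨h1, fun hr => absurd (h2 hr).1 hc.1, fun hbne => ?_, fun p hp => ?_⟩
      · have h5 := h3 hc.1
        rcases hc.2 with h6 | h6
        · exact absurd h6 hbne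
        · omega
      · rcases List.mem_cons.mp hp with rfl | hp'
        · exact Or.inr (h3 hc.1)
        · exact h4 p hp'
    · have hstep : bestStep s b q = b := by
        unfold bestStep; rw [if_neg hc]
      rw [hstep]
      obtain ⟨h1, h2, h3, h4⟩ := ih b hb
      push_neg at hc
      refine ⟨h1, fun hr => ⟨(h2 hr).1, fun p hp => ?_⟩, h3, fun p hp => ?_⟩
      · rcases List.mem_cons.mp hp with rfl | hp'
        · by_contra hne
          have h5 := (hc hne).1
          exact h5 (h2 hr).1
        · exact (h2 hr).2 p hp'
      · rcases List.mem_cons.mp hp with rfl | hp'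
        · by_cases hne : PySem.Chars.find s p = -1
          · exact Or.inl hne
          · obtain ⟨hbne, hble⟩ := hc hne
            have h5 := h3 hbne
            exact Or.inr (by omega)
        · exact h4 p hp'

lemma bestFind_cases (s : List Char) :
    (bestFind s = -1 ∧ ∀ p ∈ pvPats, PySem.Chars.find s p = -1) ∨
    (0 ≤ bestFind s ∧ (∃ p ∈ pvPats, PySem.Chars.find s p = bestFind s) ∧
      ∀ p ∈ pvPats, PySem.Chars.find s p = -1 ∨ bestFind s ≤ PySem.Chars.find s p) := by
  obtain ⟨h1, h2, _, h4⟩ := foldl_bestStep_inv s pvPats (-1) (le_refl _)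
  by_cases h : bestFind s = -1
  · exact Or.inl ⟨h, (h2 h).2⟩
  · refine Or.inr ⟨by have : bestFind s = pvPats.foldl (bestStep s) (-1) := rfl; omega, ?_, h4⟩
    rcases foldl_bestStep_choice s pvPats (-1) with h0 | ⟨p, hp, hfind⟩
    · exact absurd h0 h
    · exact ⟨p, hp, hfind.symm⟩

lemma altLoop_eq_pairRem (fuel : Nat) (s parts : List Char) (hf : s.length ≤ 2 * fuel) :
    solutionAltLoop fuel s parts = parts ++ pairRem s := by
  induction fuel generalizing s parts with
  | zero =>
    have hnil : s = [] := List.eq_nil_of_length_eq_zero (by omega)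
    subst hnil
    simp [solutionAltLoop, pairRem]
  | succ fuel ih =>
    simp only [solutionAltLoop]
    by_cases h : bestFind s = -1
    · rw [if_pos h]
      have hall : ∀ j, ¬ pairAt s j := by
        intro j hpj
        obtain ⟨p, hp, hpre⟩ := (matchAt_iff s j).mpr hpj
        rcases bestFind_cases s with ⟨_, hfinds⟩ | ⟨hpos, _, _⟩
        · exact find_neg_no_prefix s p (hfinds p hp) j hpre
        · omega
      rw [pairRem_of_no_pair s hall]
    · rw [if_neg h]
      have hsz := bestFind_pos_lt s h
      rcases bestFind_cases s with ⟨h1, _⟩ | ⟨hpos, ⟨p, hp, hfind⟩, hmin⟩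
      · exact absurd h1 h
      · have hspec := PySem.Chars.find_spec (s := s) (sub := p) (by omega)
        have hat : pairAt s (bestFind s).toNat := by
          apply (matchAt_iff s _).mp
          rw [hfind] at hspec
          exact ⟨p, hp, hspec.1⟩
        have hminpair : ∀ j < (bestFind s).toNat, ¬ pairAt s j := by
          intro j hj hpj
          obtain ⟨q, hq, hqpre⟩ := (matchAt_iff s j).mpr hpj
          rcases hmin q hq with hneg | hle
          · exact find_neg_no_prefix s q hneg j hqpre
          · have hq0 : 0 ≤ PySem.Chars.find s q := by omega
            have hqspec := PySem.Chars.find_spec (s := s) (sub := q) hq0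
            exact hqspec.2 j (by omega) hqpre
        rw [ih (s.drop ((bestFind s).toNat + 2)) (parts ++ s.take (bestFind s).toNat)
          (by simp only [List.length_drop]; omega)]
        rw [pairRem_split (bestFind s).toNat s hat hminpair]
        simp

lemma solution_eq (S : String) : solution S = solution_alt S := by
  by_cases hS : S = ""
  · subst hS
    have h2 := altLoop_eq_pairRem 0 [] [] (by simp)
    simp only [pairRem, List.append_nil] at h2
    simp [solution, solution_alt, h2]
  · have h1 := loop_eq_pairRem (S.toList.length + 1) S.toList 0 [] (by omega)
    have h2 := altLoop_eq_pairRem S.toList.length S.toList [] (by omega)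
    simp only [Nat.cast_zero, List.drop_zero, List.nil_append] at h1 h2
    simp only [solution, solution_alt, if_neg hS]
    rw [h1, h2]

-- ===== VERDICT (by name: the statement is the Claim_ definition above) =====
theorem solution_spec : Claim_equal_solution := by
  intro S _
  unfold Spec_solution
  exact solution_eq S
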